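-- pv_equiv track=rewrite | github.com/TKTINC/ai_studio_agents | src/agents/mentor/perception/perception.py | _extract_key_values
-- ===== SOURCE A (Python) =====
-- from typing import List
--
-- def _extract_key_values(statements: List[str]) -> List[str]:
--     """
--     Extract key investment values from user statements.
--
--     Args:
--         statements: List of user statements about investing
--
--     Returns:
--         List of key values
--     """
--     # This is a simplified implementation
--     # In a real system, this would use NLP to extract values
--
--     values = []
--     value_keywords = {
--         "safety": ["safety", "security", "protection", "conservative"],
--         "growth": ["growth", "appreciation", "expansion"],
--         "income": ["income", "dividend", "yield", "cash flow"],
--         "sustainability": ["sustainable", "responsible", "ESG", "ethical"],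
--         "innovation": ["innovation", "disruptive", "cutting-edge", "technology"]
--     }
--
--     for statement in statements:
--         statement = statement.lower()
--         for value, keywords in value_keywords.items():
--             if any(keyword in statement for keyword in keywords) and value not in values:
--                 values.append(value)
--
--     return values
-- ===== SOURCE B (Python) =====
-- from typing import List
--
-- def _extract_key_values(statements: List[str]) -> List[str]:
--     value_keywords = {
--         "safety": ["safety", "security", "protection", "conservative"],
--         "growth": ["growth", "appreciation", "expansion"],
--         "income": ["income", "dividend", "yield", "cash flow"],
--         "sustainability": ["sustainable", "responsible", "ESG", "ethical"],
--         "innovation": ["innovation", "disruptive", "cutting-edge", "technology"]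
--     }
--     low = [s.lower() for s in statements]
--     pairs = []
--     for pos, (value, keywords) in enumerate(value_keywords.items()):
--         idx = next((i for i, s in enumerate(low) if any(k in s for k in keywords)), None)
--         if idx is not None:
--             pairs.append((idx, pos, value))
--     pairs.sort(key=lambda t: (t[0], t[1]))
--     return [t[2] for t in pairs]
-- ===== Notes on version B (the rewrite author's own statement) =====
-- stated objective: alternative
-- what changed: Replaces A's streaming discovery-order append with a dedup membership test by an earliest-match index table per category followed by one sort on (earliest index, dict position), which reproduces A's ordering without any accumulator membership checks.
import Mathlib
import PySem

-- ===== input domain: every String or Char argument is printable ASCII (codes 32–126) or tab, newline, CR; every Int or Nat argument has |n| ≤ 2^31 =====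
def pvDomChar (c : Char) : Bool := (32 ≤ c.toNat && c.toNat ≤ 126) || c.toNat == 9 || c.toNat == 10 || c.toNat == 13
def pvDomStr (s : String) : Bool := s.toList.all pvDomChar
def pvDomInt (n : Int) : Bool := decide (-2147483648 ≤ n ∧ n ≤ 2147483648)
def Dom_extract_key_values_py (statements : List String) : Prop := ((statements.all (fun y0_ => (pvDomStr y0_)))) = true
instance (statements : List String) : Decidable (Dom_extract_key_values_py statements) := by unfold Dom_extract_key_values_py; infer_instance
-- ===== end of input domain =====

-- B replaces A's streaming discovery-order append (with a membership scan of the result) by an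
-- earliest-match index table per category followed by one sort on (earliest index, dict position);
-- an alternative decomposition of the same cost, proved to return the identical list.

-- ===== PORT A =====
-- the value_keywords dict of A (never mutated; looped over as .items())
def pvValueKeywords : List (String × List String) :=
  [("safety", ["safety", "security", "protection", "conservative"]),
   ("growth", ["growth", "appreciation", "expansion"]),
   ("income", ["income", "dividend", "yield", "cash flow"]),
   ("sustainability", ["sustainable", "responsible", "ESG", "ethical"]),
   ("innovation", ["innovation", "disruptive", "cutting-edge", "technology"])]

def extract_key_values_py (statements : List String) : List String :=
  statements.foldl (fun values statement =>
    let st := PySem.Str.lower statement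
    pvValueKeywords.foldl (fun vs vk =>
      if (vk.2.any (fun keyword => PySem.Str.isIn keyword st)) && !(vs.contains vk.1)
      then vs ++ [vk.1] else vs) values) []

-- ===== PORT B =====
def pvMatches (s : String) (kws : List String) : Bool := kws.any (fun k => PySem.Str.isIn k s)

def extract_key_values_py_alt (statements : List String) : List String :=
  let low := statements.map PySem.Str.lower
  let pairs := (PySem.List.enumerate pvValueKeywords).foldl
    (fun acc pvk =>
      match low.findIdx? (fun s => pvMatches s pvk.2.2) with
      | some i => acc ++ [((i : Int), pvk.1, pvk.2.1)]
      | none => acc) []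
  (PySem.List.sorted2 pairs (fun t => t.1) (fun t => t.2.1)).map (fun t => t.2.2)

-- ===== PRECONDITION & SPEC =====
def Spec_extract_key_values_py (statements : List String) (out : List String) : Prop := out = extract_key_values_py_alt statements
instance (statements : List String) (out : List String) : Decidable (Spec_extract_key_values_py statements out) := by unfold Spec_extract_key_values_py; infer_instance

-- ===== CLAIM (what is proved, stated in full; the proofs are below) =====
def Claim_equal_extract_key_values_py : Prop := ∀ (statements : List String), Dom_extract_key_values_py statements → Spec_extract_key_values_py statements (extract_key_values_py statements)

-- ===== LEMMAS AND PROOFS =====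

-- proof-side abbreviations
def pvStep (values : List String) (statement : String) : List String :=
  let st := PySem.Str.lower statement
  pvValueKeywords.foldl (fun vs vk =>
    if (vk.2.any (fun keyword => PySem.Str.isIn keyword st)) && !(vs.contains vk.1)
    then vs ++ [vk.1] else vs) values

-- the pair table of B, as a filterMap
def pvPairs (statements : List String) : List (Int × Int × String) :=
  (PySem.List.enumerate pvValueKeywords).filterMap
    (fun pvk => ((statements.map PySem.Str.lower).findIdx? (fun s => pvMatches s pvk.2.2)).map
      (fun i : Nat => ((i : Int), pvk.1, pvk.2.1)))

-- the canonical form: pairs grouped by earliest statement index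
def pvBuckets (statements : List String) (m : Nat) : List (Int × Int × String) :=
  (List.range m).flatMap (fun i => (pvPairs statements).filter (fun t => t.1.toNat == i))

def pvV (statements : List String) (m : Nat) : List String :=
  (pvBuckets statements m).map (fun t => t.2.2)

lemma pv_foldl_opt (low : List String) (l : List (Int × String × List String))
    (acc : List (Int × Int × String)) :
    l.foldl (fun acc pvk =>
        match low.findIdx? (fun s => pvMatches s pvk.2.2) with
        | some i => acc ++ [((i : Int), pvk.1, pvk.2.1)]
        | none => acc) acc
      = acc ++ l.filterMap
          (fun pvk => (low.findIdx? (fun s => pvMatches s pvk.2.2)).map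
            (fun i : Nat => ((i : Int), pvk.1, pvk.2.1))) := by
  induction l generalizing acc with
  | nil => simp
  | cons x xs ih =>
    simp only [List.foldl_cons, List.filterMap_cons]
    cases hx : low.findIdx? (fun s => pvMatches s x.2.2) <;> simp [ih]

lemma pv_alt_eq (statements : List String) :
    extract_key_values_py_alt statements
      = (PySem.List.sorted2 (pvPairs statements) (fun t => t.1) (fun t => t.2.1)).map
          (fun t => t.2.2) := by
  show (PySem.List.sorted2 (List.foldl _ [] _) _ _).map _ = _
  rw [pv_foldl_opt, List.nil_append]; rfl

-- partitioning a list into key-buckets is a permutation of it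
lemma pv_bucket_perm {α : Type} (key : α → Nat) :
    ∀ (n : Nat) (l : List α), (∀ t ∈ l, key t < n) →
      ((List.range n).flatMap (fun i => l.filter (fun t => key t == i))).Perm l := by
  intro n
  induction n with
  | zero =>
    intro l h
    cases l with
    | nil => simp
    | cons x xs => exact absurd (h x (List.mem_cons_self)) (by omega)
  | succ n ih =>
    intro l h
    rw [List.range_succ, List.flatMap_append, List.flatMap_singleton]
    have hcongr : ∀ i ∈ List.range n,
        l.filter (fun t => key t == i)
          = (l.filter (fun t => !(key t == n))).filter (fun t => key t == i) := by
      intro i hi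
      rw [List.filter_filter]
      apply List.filter_congr
      intro x hx
      rcases hb : (key x == n) <;> rcases hb' : (key x == i) <;>
        simp_all [List.mem_range]
    rw [List.flatMap_congr hcongr]
    have hlt : ∀ t ∈ l.filter (fun t => !(key t == n)), key t < n := by
      intro t ht
      rw [List.mem_filter] at ht
      have := h t ht.1
      have hne := ht.2
      simp at hne
      omega
    have hperm := List.filter_append_perm (fun t => !(key t == n)) l
    simp only [Bool.not_not] at hperm
    exact ((ih _ hlt).append (List.Perm.refl _)).trans hperm

-- buckets are pairwise strictly increasing in the lexicographic (k1, k2) key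
lemma pv_bucket_pairwise {α : Type} (k1 k2 : α → Int) (n : Nat) (l : List α)
    (h0 : ∀ t ∈ l, 0 ≤ k1 t) (hp : l.Pairwise (fun a b => k2 a < k2 b)) :
    ((List.range n).flatMap (fun i => l.filter (fun t => (k1 t).toNat == i))).Pairwise
      (fun a b => toLex (k1 a, k2 a) < toLex (k1 b, k2 b)) := by
  induction n with
  | zero => simp
  | succ n ih =>
    rw [List.range_succ, List.flatMap_append, List.flatMap_singleton, List.pairwise_append]
    refine ⟨ih, ?_, ?_⟩
    · have := hp.filter (fun t => (k1 t).toNat == n)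
      refine this.imp_of_mem ?_
      intro a b ha hb hk2
      rw [List.mem_filter] at ha hb
      have ha1 : k1 a = (n : Int) := by
        have := h0 a ha.1
        have := of_decide_eq_true ha.2
        omega
      have hb1 : k1 b = (n : Int) := by
        have := h0 b hb.1
        have := of_decide_eq_true hb.2
        omega
      rw [Prod.Lex.lt_iff]
      simp only [ofLex_toLex]
      exact Or.inr ⟨by rw [ha1, hb1], hk2⟩
    · intro a ha b hb
      rw [List.mem_flatMap] at ha
      obtain ⟨i, hi, hai⟩ := ha
      rw [List.mem_range] at hi
      rw [List.mem_filter] at hai hb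
      have ha1 : k1 a = (i : Int) := by
        have := h0 a hai.1
        have := of_decide_eq_true hai.2
        omega
      have hb1 : k1 b = (n : Int) := by
        have := h0 b hb.1
        have := of_decide_eq_true hb.2
        omega
      rw [Prod.Lex.lt_iff]
      simp only [ofLex_toLex]
      exact Or.inl (by rw [ha1, hb1]; exact_mod_cast hi)

-- sorted with a 2-component key is sorted with the lexicographic key
lemma pv_sorted2_eq_sorted_toLex {α : Type} (xs : List α) (k1 k2 : α → Int) :
    PySem.List.sorted2 xs k1 k2 = PySem.List.sorted xs (fun x => toLex (k1 x, k2 x)) := by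
  have hbefore : (fun a b => decide (k1 a < k1 b) || (!decide (k1 b < k1 a) && decide (k2 a < k2 b)))
      = (fun a b => decide (toLex (k1 a, k2 a) < toLex (k1 b, k2 b))) := by
    funext a b
    rw [Bool.eq_iff_iff]
    simp only [decide_eq_true_eq, Bool.or_eq_true, Bool.and_eq_true, Bool.not_eq_true',
      decide_eq_false_iff_not, Prod.Lex.lt_iff, ofLex_toLex]
    omega
  simp only [PySem.List.sorted2, PySem.List.sorted, if_neg, Bool.false_eq_true, not_false_iff]
  rw [hbefore]

lemma pv_pairs_mem {statements : List String} {t : Int × Int × String}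
    (ht : t ∈ pvPairs statements) :
    0 ≤ t.1 ∧ t.1.toNat < statements.length := by
  rw [pvPairs, List.mem_filterMap] at ht
  obtain ⟨pvk, _, hf⟩ := ht
  cases hidx : (statements.map PySem.Str.lower).findIdx? (fun s => pvMatches s pvk.2.2) with
  | none => rw [hidx] at hf; simp at hf
  | some i =>
    rw [hidx] at hf
    simp only [Option.map_some, Option.some.injEq] at hf
    obtain ⟨hlen, -, -⟩ := List.findIdx?_eq_some_iff_getElem.mp hidx
    rw [List.length_map] at hlen
    subst hf
    exact ⟨Int.natCast_nonneg i, by simpa using hlen⟩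

lemma pv_pairs_pos_pairwise (statements : List String) :
    (pvPairs statements).Pairwise (fun a b => a.2.1 < b.2.1) := by
  rw [pvPairs, List.pairwise_filterMap]
  have henum : (PySem.List.enumerate pvValueKeywords).Pairwise (fun p q => p.1 < q.1) := by
    decide
  refine henum.imp ?_
  intro p q hlt b hb b' hb'
  obtain ⟨i, -, hgb⟩ := Option.map_eq_some_iff.mp hb
  obtain ⟨i', -, hgb'⟩ := Option.map_eq_some_iff.mp hb'
  subst hgb hgb'
  exact hlt

lemma pv_sorted2_pairs (statements : List String) :
    PySem.List.sorted2 (pvPairs statements) (fun t => t.1) (fun t => t.2.1)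
      = pvBuckets statements statements.length := by
  rw [pv_sorted2_eq_sorted_toLex]
  apply PySem.List.sorted_eq_of_perm_of_pairwise_lt
  · exact pv_bucket_perm (fun t => t.1.toNat) statements.length (pvPairs statements)
      (fun t ht => (pv_pairs_mem ht).2)
  · exact pv_bucket_pairwise (fun t => t.1) (fun t => t.2.1) statements.length (pvPairs statements)
      (fun t ht => (pv_pairs_mem ht).1) (pv_pairs_pos_pairwise statements)

-- generic inner category fold (names nodup): one statement appends exactly the
-- matching categories not yet present
lemma pv_inner_fold (s : String) :
    ∀ (cats : List (String × List String)) (vs : List String),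
      (cats.map Prod.fst).Nodup →
      cats.foldl (fun acc vk =>
          if (vk.2.any (fun keyword => PySem.Str.isIn keyword s)) && !(acc.contains vk.1)
          then acc ++ [vk.1] else acc) vs
        = vs ++ (cats.filter (fun vk =>
            (vk.2.any (fun keyword => PySem.Str.isIn keyword s)) && !(vs.contains vk.1))).map Prod.fst := by
  intro cats
  induction cats with
  | nil => intro vs _; simp
  | cons vk rest ih =>
    intro vs hnodup
    rw [List.map_cons, List.nodup_cons] at hnodup
    obtain ⟨hne, hnodup'⟩ := hnodup
    rw [List.foldl_cons, List.filter_cons]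
    by_cases hc : ((vk.2.any (fun keyword => PySem.Str.isIn keyword s)) && !(vs.contains vk.1)) = true
    · rw [if_pos hc, if_pos hc, ih (vs ++ [vk.1]) hnodup']
      have hfc : rest.filter (fun vk' =>
            (vk'.2.any (fun keyword => PySem.Str.isIn keyword s)) && !((vs ++ [vk.1]).contains vk'.1))
          = rest.filter (fun vk' =>
            (vk'.2.any (fun keyword => PySem.Str.isIn keyword s)) && !(vs.contains vk'.1)) := by
      
        apply List.filter_congr
        intro x hx
        have hxne : x.1 ≠ vk.1 := fun h => hne (h ▸ List.mem_map_of_mem hx)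
        simp [hxne]
      rw [hfc, List.map_cons, List.append_assoc, List.singleton_append]
    · rw [if_neg hc, if_neg hc]
      exact ih vs hnodup' 

lemma pv_mem_enumerate {α : Type} (xs : List α) (x : α) (hx : x ∈ xs) :
    ∀ s : Int, ∃ p ∈ PySem.List.enumerate xs s, p.2 = x := by
  induction xs with
  | nil => cases hx
  | cons y ys ih =>
    intro s
    rw [PySem.List.enumerate_cons]
    rcases List.mem_cons.mp hx with h | h
    · exact ⟨(s, y), List.mem_cons_self, h.symm⟩
    · obtain ⟨p, hp, hpx⟩ := ih h (s + 1)
      exact ⟨p, List.mem_cons_of_mem _ hp, hpx⟩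

lemma pv_nodup_names : (pvValueKeywords.map Prod.fst).Nodup := by decide

lemma pv_mem_V_iff (statements : List String) (m : Nat) (vk : String × List String)
    (hvk : vk ∈ pvValueKeywords) :
    (pvV statements m).contains vk.1 = true ↔
      ∃ i, (statements.map PySem.Str.lower).findIdx? (fun s => pvMatches s vk.2) = some i ∧ i < m := by
  rw [List.contains_iff_mem, pvV, List.mem_map]
  constructor
  · rintro ⟨t, ht, hname⟩
    rw [pvBuckets, List.mem_flatMap] at ht
    obtain ⟨i, hi, hti⟩ := ht
    rw [List.mem_range] at hi
    rw [List.mem_filter] at hti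
    obtain ⟨htp, htn⟩ := hti
    rw [pvPairs, List.mem_filterMap] at htp
    obtain ⟨pvk, hpvk, hf⟩ := htp
    cases hidx : (statements.map PySem.Str.lower).findIdx? (fun s => pvMatches s pvk.2.2) with
    | none => rw [hidx] at hf; simp at hf
    | some j =>
      rw [hidx] at hf
      simp only [Option.map_some, Option.some.injEq] at hf
      subst hf
      have hsnd : pvk.2 ∈ pvValueKeywords := by
        rw [← PySem.List.map_snd_enumerate pvValueKeywords 0]
        exact List.mem_map_of_mem hpvk
      have heq : pvk.2 = vk :=
        List.inj_on_of_nodup_map pv_nodup_names hsnd hvk hname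
      refine ⟨j, by rw [← heq]; exact hidx, ?_⟩
      have : ((j : Int)).toNat = i := by simpa using htn
      omega
  · rintro ⟨i, hfi, him⟩
    obtain ⟨p, hp, hpx⟩ := pv_mem_enumerate pvValueKeywords vk hvk 0
    refine ⟨((i : Int), p.1, vk.1), ?_, rfl⟩
    rw [pvBuckets, List.mem_flatMap]
    refine ⟨i, List.mem_range.mpr him, ?_⟩
    rw [List.mem_filter]
    constructor
    · rw [pvPairs, List.mem_filterMap]
      refine ⟨p, hp, ?_⟩
      rw [hpx, hfi]
      simp
    · simp

lemma pv_filter_map_eq_filterMap {α β : Type} (l : List α) (p : α → Bool) (g : α → β) :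
    (l.filter p).map g = l.filterMap (fun a => if p a then some (g a) else none) := by
  induction l with
  | nil => simp
  | cons x xs ih => by_cases h : p x <;> simp [h, ih]

lemma pv_step_eq (statements : List String) (m : Nat) (hm : m < statements.length) :
    pvStep (pvV statements m) statements[m] = pvV statements (m + 1) := by
  simp only [pvStep]
  rw [pv_inner_fold (PySem.Str.lower statements[m]) pvValueKeywords (pvV statements m) pv_nodup_names]
  have hsplit : pvV statements (m + 1)
      = pvV statements m
        ++ ((pvPairs statements).filter (fun t => t.1.toNat == m)).map (fun t => t.2.2) := by
    rw [pvV, pvV, pvBuckets, pvBuckets, List.range_succ, List.flatMap_append,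
      List.flatMap_singleton, List.map_append]
  rw [hsplit]
  congr 1
  -- both sides as filterMap over the enumerated categories
  have hcats : pvValueKeywords = (PySem.List.enumerate pvValueKeywords).map (fun p => p.2) :=
    (PySem.List.map_snd_enumerate pvValueKeywords 0).symm
  conv_lhs => rw [hcats]
  rw [List.filter_map, List.map_map, pv_filter_map_eq_filterMap, pvPairs,
    List.filter_filterMap, List.map_filterMap]
  apply List.filterMap_congr
  intro p hp
  simp only [Function.comp_apply]
  have hmem : p.2 ∈ pvValueKeywords := by
    rw [← PySem.List.map_snd_enumerate pvValueKeywords 0]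
    exact List.mem_map_of_mem hp
  have hst : (statements.map PySem.Str.lower)[m]'(by simpa using hm) = PySem.Str.lower statements[m] :=
    List.getElem_map _
  cases hidx : (statements.map PySem.Str.lower).findIdx? (fun s => pvMatches s p.2.2) with
  | none =>
    have hnm := List.findIdx?_eq_none_iff.mp hidx _ (List.getElem_mem (by simpa using hm))
    rw [hst, pvMatches] at hnm
    simp only [List.any_eq_false] at hnm
    have hcond : (p.2.2.any fun keyword => PySem.Str.isIn keyword (PySem.Str.lower statements[m])) = false :=
      List.any_eq_false.mpr (by simpa using hnm)
    simp only [Option.map_none]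
    rw [if_neg (by intro hcT; rw [Bool.and_eq_true, hcond] at hcT; exact Bool.false_ne_true hcT.1)]
    rfl
  | some i =>
    obtain ⟨hlen, hpi, hmin⟩ := List.findIdx?_eq_some_iff_getElem.mp hidx
    have hcontains := pv_mem_V_iff statements m p.2 hmem
    rw [hidx] at hcontains
    simp only [Option.map_some]
    by_cases him : i = m
    · have hnc : ((pvV statements m).contains p.2.1) = false := by
        rcases hb : ((pvV statements m).contains p.2.1) with _ | _
        · rfl
        · obtain ⟨i', hi1, hi2⟩ := hcontains.mp hb
          rw [Option.some.injEq] at hi1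
          omega
      have hmn : pvMatches (PySem.Str.lower statements[m]) p.2.2 = true := by
        rw [← hst]
        have hpi' := hpi
        simp only [him] at hpi'
        exact hpi'
      rw [pvMatches] at hmn
      rw [if_pos (by rw [Bool.and_eq_true, hmn, hnc]; exact ⟨rfl, rfl⟩)]
      simp [Option.filter, him]
    · have hrhs : Option.map (fun t => t.2.2)
          (Option.filter (fun t => t.1.toNat == m) (some ((i : Int), p.1, p.2.1))) = none := by
        simp [Option.filter, him]
      rw [hrhs]
      rcases Nat.lt_or_ge i m with hlt | hge
      · have hc : ((pvV statements m).contains p.2.1) = true := hcontains.mpr ⟨i, rfl, hlt⟩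
        rw [if_neg]
        intro hcT
        rw [Bool.and_eq_true, hc] at hcT
        simp at hcT
      · have hmge : m < i := by omega
        have hnm := hmin m hmge
        rw [hst] at hnm
        rw [pvMatches] at hnm
        rw [if_neg]
        intro hcT
        rw [Bool.and_eq_true] at hcT
        exact hnm hcT.1

lemma pv_foldl_from (statements : List String) :
    ∀ (k m : Nat), statements.length = m + k →
      (statements.drop m).foldl pvStep (pvV statements m) = pvV statements statements.length := by
  intro k
  induction k with
  | zero =>
    intro m hm
    have hme : m = statements.length := by omega
    subst hme
    rw [List.drop_length, List.foldl_nil]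
  | succ k ih =>
    intro m hm
    have hmlt : m < statements.length := by omega
    rw [List.drop_eq_getElem_cons hmlt, List.foldl_cons, pv_step_eq statements m hmlt]
    exact ih (m + 1) (by omega)

-- ===== VERDICT (by name: the statement is the Claim_ definition above) =====
theorem extract_key_values_py_spec : Claim_equal_extract_key_values_py := by
  intro statements _
  show extract_key_values_py statements = extract_key_values_py_alt statements
  have hA : extract_key_values_py statements = pvV statements statements.length := by
    have h0 : pvV statements 0 = [] := by simp [pvV, pvBuckets]
    have h := pv_foldl_from statements statements.length 0 (by omega)
    rw [h0, List.drop_zero] at h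
    exact h
  rw [hA, pv_alt_eq, pv_sorted2_pairs, pvV]
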